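-- pv_equiv track=rewrite | github.com/EmmaBin/DSA | c_compare_lexi_order.py | solution
-- ===== SOURCE A (Python) =====
-- def solution(s, t):
--     counter =0
--     s_list = list(s)
--     t_list = list(t)
--     pt1=0
--     new_s_list = s_list
--     new_t_list = t_list
--     for i, c in enumerate(s_list):
--         if c.isdigit():
--             new_s_list=s_list[:i]+s_list[i+1:]
--             if compare_strings(("").join(new_s_list),t):
--                 counter+=1
--     for i,c in enumerate(t_list):
--         if c.isdigit():
--             new_t_list=t_list[:i]+t_list[i+1:]
--             if compare_strings(s,("").join(new_t_list)):
--                 counter+=1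
--     return counter
--
-- def compare_strings(s,t):
--     return s<t
-- ===== SOURCE B (Python) =====
-- def solution(s, t):
--     # O(n+m): resolve each removal's comparison in O(1) via the longest common
--     # prefix of s and t and two backward passes carrying a running suffix comparison.
--     if not any(s.find(d) != -1 or t.find(d) != -1 for d in "0123456789"):
--         return 0
--     n, m = len(s), len(t)
--     lcp = 0
--     while lcp < n and lcp < m and s[lcp] == t[lcp]:
--         lcp += 1
--     # value of "s with a char removed at i > lcp" < t  (position lcp decides)
--     rest_s = lcp < n and lcp < m and s[lcp] < t[lcp]
--     # value of "s < (t with a char removed at j > lcp)"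
--     rest_t = lcp >= n or (lcp < m and s[lcp] < t[lcp])
--     count = 0
--     cur = False  # cur = (s[i+1:] < t[i:]) after processing index i
--     for i in range(n - 1, -1, -1):
--         if i >= m:
--             cur = False
--         elif i + 1 >= n:
--             cur = True
--         elif s[i + 1] < t[i]:
--             cur = True
--         elif t[i] < s[i + 1]:
--             cur = False
--         # else keep cur (tie propagates)
--         if s[i].isdigit() and (cur if i <= lcp else rest_s):
--             count += 1
--     cur = False  # cur = (s[j:] < t[j+1:]) after processing index j
--     for j in range(m - 1, -1, -1):
--         if j >= n:
--             cur = j + 1 < m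
--         elif j + 1 >= m:
--             cur = False
--         elif s[j] < t[j + 1]:
--             cur = True
--         elif t[j + 1] < s[j]:
--             cur = False
--         if t[j].isdigit() and (cur if j <= lcp else rest_t):
--             count += 1
--     return count
-- ===== Notes on version B (the rewrite author's own statement) =====
-- stated objective: faster
-- what changed: Instead of rebuilding the deleted string and lexicographically comparing it for every digit position, B returns 0 immediately when neither string contains a digit (ten C-level str.find scans), and otherwise computes the longest common prefix of s and t once and runs one backward pass per string carrying a running suffix comparison, deciding each removal's comparison in O(1).
import Mathlib
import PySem

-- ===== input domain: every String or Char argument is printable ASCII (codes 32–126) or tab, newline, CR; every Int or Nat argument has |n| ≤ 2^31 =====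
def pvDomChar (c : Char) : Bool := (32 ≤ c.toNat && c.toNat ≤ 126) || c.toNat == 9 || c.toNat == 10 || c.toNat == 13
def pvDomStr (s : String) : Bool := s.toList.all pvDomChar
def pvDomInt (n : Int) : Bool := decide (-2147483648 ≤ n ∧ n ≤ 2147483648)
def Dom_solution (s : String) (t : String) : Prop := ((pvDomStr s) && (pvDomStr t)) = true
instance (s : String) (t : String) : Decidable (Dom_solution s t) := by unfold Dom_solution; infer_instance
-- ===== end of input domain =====

-- B replaces A's per-index rebuild-and-compare by one common-prefix scan plus two backward
-- passes carrying a running suffix comparison, deciding each removal's comparison in O(1)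
-- (objective: faster).

-- ===== PORT A =====
def solution (s : String) (t : String) : Int :=
  let s_list := s.toList
  let t_list := t.toList
  let counter : Int := 0
  let counter := (PySem.List.enumerate s_list 0).foldl
    (fun counter p =>
      if PySem.Chars.isdigit p.2 then
        let new_s_list := PySem.List.slice s_list none (some p.1) ++
                          PySem.List.slice s_list (some (p.1 + 1)) none
        if PySem.Chars.strLt new_s_list t_list then counter + 1 else counter
      else counter) counter
  (PySem.List.enumerate t_list 0).foldl
    (fun counter p =>
      if PySem.Chars.isdigit p.2 then
        let new_t_list := PySem.List.slice t_list none (some p.1) ++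
                          PySem.List.slice t_list (some (p.1 + 1)) none
        if PySem.Chars.strLt s_list new_t_list then counter + 1 else counter
      else counter) counter

-- ===== PORT B =====
-- longest common prefix length (Source B's while loop, as the obvious structural recursion)
def lcpLen : List Char → List Char → Nat
  | x :: xs, y :: ys => if x = y then lcpLen xs ys + 1 else 0
  | _, _ => 0

-- Source B's `for i in range(n-1, -1, -1)` loop over s: fuel = number of remaining iterations;
-- state (count, cur), cur being the running suffix comparison s[i+1:] < t[i:]
def loopS (sl tl : List Char) (lcp : Nat) (restS : Bool) : Nat → Int × Bool → Int × Bool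
  | 0, st => st
  | i + 1, st =>
      let cur := if tl.length ≤ i then false
        else if sl.length ≤ i + 1 then true
        else if sl.getD (i + 1) ' ' < tl.getD i ' ' then true
        else if tl.getD i ' ' < sl.getD (i + 1) ' ' then false
        else st.2
      let count := if PySem.Chars.isdigit (sl.getD i ' ') &&
                      (if i ≤ lcp then cur else restS) then st.1 + 1 else st.1
      loopS sl tl lcp restS i (count, cur)

-- Source B's `for j in range(m-1, -1, -1)` loop over t: cur is s[j:] < t[j+1:]
def loopT (sl tl : List Char) (lcp : Nat) (restT : Bool) : Nat → Int × Bool → Int × Bool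
  | 0, st => st
  | j + 1, st =>
      let cur := if sl.length ≤ j then decide (j + 1 < tl.length)
        else if tl.length ≤ j + 1 then false
        else if sl.getD j ' ' < tl.getD (j + 1) ' ' then true
        else if tl.getD (j + 1) ' ' < sl.getD j ' ' then false
        else st.2
      let count := if PySem.Chars.isdigit (tl.getD j ' ') &&
                      (if j ≤ lcp then cur else restT) then st.1 + 1 else st.1
      loopT sl tl lcp restT j (count, cur)

-- Source B's fast path: `any(s.find(d) != -1 or t.find(d) != -1 for d in "0123456789")`
def pyDigits : List Char := ['0','1','2','3','4','5','6','7','8','9']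

def hasDigit (sl tl : List Char) : Bool :=
  pyDigits.any (fun d => (PySem.Chars.find sl [d] != -1) || (PySem.Chars.find tl [d] != -1))

def solution_alt (s : String) (t : String) : Int :=
  let sl := s.toList
  let tl := t.toList
  if !hasDigit sl tl then 0 else
  let lcp := lcpLen sl tl
  let restS := decide (lcp < sl.length) && decide (lcp < tl.length) &&
               decide (sl.getD lcp ' ' < tl.getD lcp ' ')
  let restT := decide (sl.length ≤ lcp) ||
               (decide (lcp < tl.length) && decide (sl.getD lcp ' ' < tl.getD lcp ' '))
  let c1 := (loopS sl tl lcp restS sl.length (0, false)).1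
  (loopT sl tl lcp restT tl.length (c1, false)).1

-- ===== PRECONDITION & SPEC =====
def Spec_solution (s : String) (t : String) (out : Int) : Prop := out = solution_alt s t
instance (s : String) (t : String) (out : Int) : Decidable (Spec_solution s t out) := by unfold Spec_solution; infer_instance

-- ===== CLAIM (what is proved, stated in full; the proofs are below) =====
def Claim_equal_solution : Prop := ∀ (s : String) (t : String), Dom_solution s t → Spec_solution s t (solution s t)

-- ===== LEMMAS AND PROOFS =====

-- lexicographic < on lists cancels a common prefix
theorem lex_append_cancel (p u v : List Char) : p ++ u < p ++ v ↔ u < v := by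
  induction p with
  | nil => simp
  | cons x xs ih => simp [ih]

theorem lt_iff_drop (a b : List Char) (k : Nat) (h : a.take k = b.take k) :
    a < b ↔ a.drop k < b.drop k := by
  conv_lhs => rw [← List.take_append_drop k a, ← List.take_append_drop k b, ← h]
  exact lex_append_cancel _ _ _

theorem lcpLen_take (a b : List Char) : a.take (lcpLen a b) = b.take (lcpLen a b) := by
  induction a generalizing b with
  | nil => cases b <;> simp [lcpLen]
  | cons x xs ih =>
    cases b with
    | nil => simp [lcpLen]
    | cons y ys =>
      simp only [lcpLen]
      split_ifs with h
      · simp [h, ih ys]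
      · simp

theorem lcpLen_ne (a b : List Char) (h1 : lcpLen a b < a.length) (h2 : lcpLen a b < b.length) :
    a.getD (lcpLen a b) ' ' ≠ b.getD (lcpLen a b) ' ' := by
  induction a generalizing b with
  | nil => simp at h1
  | cons x xs ih =>
    cases b with
    | nil => simp at h2
    | cons y ys =>
      simp only [lcpLen] at *
      split_ifs at * with h
      · simpa using ih ys (by simpa using h1) (by simpa using h2)
      · simpa using h

theorem take_prefix_eq (sl tl : List Char) (i : Nat) (hik : i ≤ lcpLen sl tl) :
    sl.take i = tl.take i := by
  have h1 : (sl.take (lcpLen sl tl)).take i = sl.take i := by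
    rw [List.take_take, min_eq_left hik]
  have h2 : (tl.take (lcpLen sl tl)).take i = tl.take i := by
    rw [List.take_take, min_eq_left hik]
  rw [← h1, ← h2, lcpLen_take]

-- the per-step recomputation of cur in loopS is the suffix comparison s[i+1:] < t[i:]
theorem curS_eq (sl tl : List Char) (f : Nat) (b : Bool)
    (hb : f + 1 = sl.length ∨ b = decide (sl.drop (f + 2) < tl.drop (f + 1))) :
    (if tl.length ≤ f then false
     else if sl.length ≤ f + 1 then true
     else if sl.getD (f + 1) ' ' < tl.getD f ' ' then true
     else if tl.getD f ' ' < sl.getD (f + 1) ' ' then false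
     else b) = decide (sl.drop (f + 1) < tl.drop f) := by
  by_cases hm : tl.length ≤ f
  · have hlt : ¬ (sl.drop (f + 1) < tl.drop f) := by
      rw [List.drop_eq_nil_of_le hm]; exact List.not_lt_nil _
    simp [hm, hlt]
  · have hm' : f < tl.length := lt_of_not_ge hm
    by_cases hn : sl.length ≤ f + 1
    · have hlt : sl.drop (f + 1) < tl.drop f := by
        rw [List.drop_eq_nil_of_le hn, List.drop_eq_getElem_cons hm']
        exact List.nil_lt_cons _ _
      simp [hm, hn, hlt]
    · have hn' : f + 1 < sl.length := lt_of_not_ge hn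
      have hiff : (sl.drop (f + 1) < tl.drop f) ↔
          (sl[f+1] < tl[f] ∨ (sl[f+1] = tl[f] ∧ sl.drop (f + 2) < tl.drop (f + 1))) := by
        rw [List.drop_eq_getElem_cons hm', List.drop_eq_getElem_cons hn']
        exact List.cons_lt_cons_iff
      rw [List.getD_eq_getElem sl ' ' hn', List.getD_eq_getElem tl ' ' hm']
      by_cases h1 : sl[f+1] < tl[f]
      · have hlt : sl.drop (f + 1) < tl.drop f := hiff.mpr (Or.inl h1)
        simp [hm, hn, h1, hlt]
      · by_cases h2 : tl[f] < sl[f+1]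
        · have hlt : ¬ (sl.drop (f + 1) < tl.drop f) := by
            rw [hiff]
            rintro (h | ⟨he, -⟩)
            · exact h1 h
            · exact absurd he (ne_of_gt h2)
          simp [hm, hn, h1, h2, hlt]
        · have he : sl[f+1] = tl[f] := le_antisymm (not_lt.mp h2) (not_lt.mp h1)
          have hb' : b = decide (sl.drop (f + 2) < tl.drop (f + 1)) :=
            hb.resolve_left (by omega)
          have hiff2 : (sl.drop (f + 1) < tl.drop f) ↔ (sl.drop (f + 2) < tl.drop (f + 1)) := by
            rw [hiff]; simp [he]
          simp only [hm, hn, h1, h2, if_false, hb']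
          exact (decide_eq_decide.mpr hiff2).symm

theorem curT_eq (sl tl : List Char) (f : Nat) (b : Bool)
    (hb : f + 1 = tl.length ∨ b = decide (sl.drop (f + 1) < tl.drop (f + 2))) :
    (if sl.length ≤ f then decide (f + 1 < tl.length)
     else if tl.length ≤ f + 1 then false
     else if sl.getD f ' ' < tl.getD (f + 1) ' ' then true
     else if tl.getD (f + 1) ' ' < sl.getD f ' ' then false
     else b) = decide (sl.drop f < tl.drop (f + 1)) := by
  by_cases hn : sl.length ≤ f
  · rw [List.drop_eq_nil_of_le hn]
    by_cases hq : f + 1 < tl.length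
    · have hlt : ([] : List Char) < tl.drop (f + 1) := by
        rw [List.drop_eq_getElem_cons hq]; exact List.nil_lt_cons _ _
      simp [hn, hq, hlt]
    · have hlt : ¬ (([] : List Char) < tl.drop (f + 1)) := by
        rw [List.drop_eq_nil_of_le (by omega)]; exact List.not_lt_nil _
      simp [hn, hq, hlt]
  · have hn' : f < sl.length := lt_of_not_ge hn
    by_cases hm : tl.length ≤ f + 1
    · have hlt : ¬ (sl.drop f < tl.drop (f + 1)) := by
        rw [List.drop_eq_nil_of_le hm]; exact List.not_lt_nil _
      simp [hn, hm, hlt]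
    · have hm' : f + 1 < tl.length := lt_of_not_ge hm
      have hiff : (sl.drop f < tl.drop (f + 1)) ↔
          (sl[f] < tl[f+1] ∨ (sl[f] = tl[f+1] ∧ sl.drop (f + 1) < tl.drop (f + 2))) := by
        rw [List.drop_eq_getElem_cons hm', List.drop_eq_getElem_cons hn']
        exact List.cons_lt_cons_iff
      rw [List.getD_eq_getElem sl ' ' hn', List.getD_eq_getElem tl ' ' hm']
      by_cases h1 : sl[f] < tl[f+1]
      · have hlt : sl.drop f < tl.drop (f + 1) := hiff.mpr (Or.inl h1)
        simp [hn, hm, h1, hlt]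
      · by_cases h2 : tl[f+1] < sl[f]
        · have hlt : ¬ (sl.drop f < tl.drop (f + 1)) := by
            rw [hiff]
            rintro (h | ⟨he, -⟩)
            · exact h1 h
            · exact absurd he (ne_of_gt h2)
          simp [hn, hm, h1, h2, hlt]
        · have he : sl[f] = tl[f+1] := le_antisymm (not_lt.mp h2) (not_lt.mp h1)
          have hb' : b = decide (sl.drop (f + 1) < tl.drop (f + 2)) :=
            hb.resolve_left (by omega)
          have hiff2 : (sl.drop f < tl.drop (f + 1)) ↔ (sl.drop (f + 1) < tl.drop (f + 2)) := by
            rw [hiff]; simp [he]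
          simp only [hn, hm, h1, h2, if_false, hb']
          exact (decide_eq_decide.mpr hiff2).symm

-- weight of index j in the s-loop / t-loop
def wS (sl tl : List Char) (lcp : Nat) (restS : Bool) (j : Nat) : Int :=
  if PySem.Chars.isdigit (sl.getD j ' ') &&
     (if j ≤ lcp then decide (sl.drop (j + 1) < tl.drop j) else restS) then 1 else 0

def wT (sl tl : List Char) (lcp : Nat) (restT : Bool) (j : Nat) : Int :=
  if PySem.Chars.isdigit (tl.getD j ' ') &&
     (if j ≤ lcp then decide (sl.drop j < tl.drop (j + 1)) else restT) then 1 else 0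

theorem loopS_spec (sl tl : List Char) (lcp : Nat) (restS : Bool) :
    ∀ (f : Nat) (c : Int) (b : Bool), f ≤ sl.length →
    (f = sl.length ∨ b = decide (sl.drop (f + 1) < tl.drop f)) →
    (loopS sl tl lcp restS f (c, b)).1 = c + ((List.range f).map (wS sl tl lcp restS)).sum := by
  intro f
  induction f with
  | zero => intro c b _ _; simp [loopS]
  | succ f ih =>
    intro c b hle hinv
    have hcur := curS_eq sl tl f b hinv
    simp only [loopS]
    rw [hcur]
    rw [ih _ _ (by omega) (Or.inr rfl)]
    rw [List.range_succ, List.map_append, List.sum_append]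
    simp only [List.map_cons, List.map_nil, List.sum_cons, List.sum_nil, wS]
    split_ifs <;> ring

theorem loopT_spec (sl tl : List Char) (lcp : Nat) (restT : Bool) :
    ∀ (f : Nat) (c : Int) (b : Bool), f ≤ tl.length →
    (f = tl.length ∨ b = decide (sl.drop f < tl.drop (f + 1))) →
    (loopT sl tl lcp restT f (c, b)).1 = c + ((List.range f).map (wT sl tl lcp restT)).sum := by
  intro f
  induction f with
  | zero => intro c b _ _; simp [loopT]
  | succ f ih =>
    intro c b hle hinv
    have hcur := curT_eq sl tl f b hinv
    simp only [loopT]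
    rw [hcur]
    rw [ih _ _ (by omega) (Or.inr rfl)]
    rw [List.range_succ, List.map_append, List.sum_append]
    simp only [List.map_cons, List.map_nil, List.sum_cons, List.sum_nil, wT]
    split_ifs <;> ring

-- removing s[i]: for i ≤ lcp the common prefix survives; for i > lcp position lcp decides
theorem delS_iff (sl tl : List Char) (i : Nat) (hi : i < sl.length) :
    (sl.take i ++ sl.drop (i + 1) < tl) ↔
      (if i ≤ lcpLen sl tl then sl.drop (i + 1) < tl.drop i
       else lcpLen sl tl < tl.length ∧ sl.getD (lcpLen sl tl) ' ' < tl.getD (lcpLen sl tl) ' ') := by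
  set k := lcpLen sl tl with hk
  have hlen : (sl.take i).length = i := by simp [List.length_take]; omega
  by_cases hik : i ≤ k
  · have htake : (sl.take i ++ sl.drop (i + 1)).take i = tl.take i := by
      rw [List.take_append_of_le_length (by omega), List.take_take, min_self]
      exact take_prefix_eq sl tl i hik
    have hdrop : (sl.take i ++ sl.drop (i + 1)).drop i = sl.drop (i + 1) := by
      rw [List.drop_append_of_le_length (by omega)]
      simp [List.drop_eq_nil_of_le (le_of_eq hlen)]
    rw [lt_iff_drop _ tl i htake, hdrop, if_pos hik]
  · have hki : k < i := lt_of_not_ge hik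
    have hkn : k < sl.length := by omega
    have htake : (sl.take i ++ sl.drop (i + 1)).take k = tl.take k := by
      rw [List.take_append_of_le_length (by omega), List.take_take, min_eq_left (le_of_lt hki)]
      exact take_prefix_eq sl tl k le_rfl
    rw [lt_iff_drop _ tl k htake, if_neg hik]
    by_cases hkm : k < tl.length
    · have hAlen : k < (sl.take i ++ sl.drop (i + 1)).length := by
        simp [List.length_take]; omega
      have hgA : (sl.take i ++ sl.drop (i + 1))[k]'hAlen = sl[k]'hkn := by
        rw [List.getElem_append_left (by omega)]
        simp [List.getElem_take]
      have hne : sl[k]'hkn ≠ tl[k]'hkm := by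
        have := lcpLen_ne sl tl hkn hkm
        rwa [List.getD_eq_getElem sl ' ' hkn, List.getD_eq_getElem tl ' ' hkm] at this
      rw [List.drop_eq_getElem_cons hkm, List.drop_eq_getElem_cons hAlen,
          List.cons_lt_cons_iff, hgA]
      rw [List.getD_eq_getElem sl ' ' hkn, List.getD_eq_getElem tl ' ' hkm]
      constructor
      · rintro (h | ⟨he, -⟩)
        · exact ⟨hkm, h⟩
        · exact absurd he hne
      · rintro ⟨-, h⟩
        exact Or.inl h
    · have hnil : tl.drop k = [] := List.drop_eq_nil_of_le (by omega)
      rw [hnil]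
      simp [List.not_lt_nil, hkm]

theorem delT_iff (sl tl : List Char) (j : Nat) (hj : j < tl.length) :
    (sl < tl.take j ++ tl.drop (j + 1)) ↔
      (if j ≤ lcpLen sl tl then sl.drop j < tl.drop (j + 1)
       else sl.length ≤ lcpLen sl tl ∨
            (lcpLen sl tl < tl.length ∧ sl.getD (lcpLen sl tl) ' ' < tl.getD (lcpLen sl tl) ' ')) := by
  set k := lcpLen sl tl with hk
  have hlen : (tl.take j).length = j := by simp [List.length_take]; omega
  have hTlen : (tl.take j ++ tl.drop (j + 1)).length = tl.length - 1 := by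
    simp [List.length_take]; omega
  by_cases hjk : j ≤ k
  · have htake : sl.take j = (tl.take j ++ tl.drop (j + 1)).take j := by
      rw [List.take_append_of_le_length (by omega), List.take_take, min_self]
      exact take_prefix_eq sl tl j hjk
    have hdrop : (tl.take j ++ tl.drop (j + 1)).drop j = tl.drop (j + 1) := by
      rw [List.drop_append_of_le_length (by omega)]
      simp [List.drop_eq_nil_of_le (le_of_eq hlen)]
    rw [lt_iff_drop sl _ j htake, hdrop, if_pos hjk]
  · have hkj : k < j := lt_of_not_ge hjk
    have hkm : k < tl.length := by omega
    have htake : sl.take k = (tl.take j ++ tl.drop (j + 1)).take k := by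
      rw [List.take_append_of_le_length (by omega), List.take_take, min_eq_left (le_of_lt hkj)]
      exact take_prefix_eq sl tl k le_rfl
    rw [lt_iff_drop sl _ k htake, if_neg hjk]
    have hTk : k < (tl.take j ++ tl.drop (j + 1)).length := by omega
    have hgT : (tl.take j ++ tl.drop (j + 1))[k]'hTk = tl[k]'hkm := by
      rw [List.getElem_append_left (by omega)]
      simp [List.getElem_take]
    by_cases hkn : k < sl.length
    · have hne : sl[k]'hkn ≠ tl[k]'hkm := by
        have := lcpLen_ne sl tl hkn hkm
        rwa [List.getD_eq_getElem sl ' ' hkn, List.getD_eq_getElem tl ' ' hkm] at this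
      rw [List.drop_eq_getElem_cons hkn, List.drop_eq_getElem_cons hTk,
          List.cons_lt_cons_iff, hgT]
      rw [List.getD_eq_getElem sl ' ' hkn, List.getD_eq_getElem tl ' ' hkm]
      constructor
      · rintro (h | ⟨he, -⟩)
        · exact Or.inr ⟨hkm, h⟩
        · exact absurd he hne
      · rintro (h | ⟨-, h⟩)
        · omega
        · exact Or.inl h
    · have hnil : sl.drop k = [] := List.drop_eq_nil_of_le (by omega)
      rw [hnil, List.drop_eq_getElem_cons hTk]
      exact iff_of_true (List.nil_lt_cons _ _) (Or.inl (by omega))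

theorem char_toNat_inj {c d : Char} (h : c.toNat = d.toNat) : c = d :=
  Char.ext (UInt32.toNat_inj.mp h)

theorem isdigit_mem (c : Char) (h : PySem.Chars.isdigit c = true) : c ∈ pyDigits := by
  simp only [PySem.Chars.isdigit, Bool.and_eq_true, decide_eq_true_eq] at h
  obtain ⟨h1, h2⟩ := h
  have hlo : 48 ≤ c.toNat := h1
  have hhi : c.toNat ≤ 57 := h2
  have hc : c.toNat = 48 ∨ c.toNat = 49 ∨ c.toNat = 50 ∨ c.toNat = 51 ∨ c.toNat = 52 ∨
      c.toNat = 53 ∨ c.toNat = 54 ∨ c.toNat = 55 ∨ c.toNat = 56 ∨ c.toNat = 57 := by omega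
  simp only [pyDigits, List.mem_cons, List.not_mem_nil, or_false]
  rcases hc with h|h|h|h|h|h|h|h|h|h
  · exact Or.inl (char_toNat_inj (by rw [h]; decide))
  · exact Or.inr (Or.inl (char_toNat_inj (by rw [h]; decide)))
  · exact Or.inr (Or.inr (Or.inl (char_toNat_inj (by rw [h]; decide))))
  · exact Or.inr (Or.inr (Or.inr (Or.inl (char_toNat_inj (by rw [h]; decide)))))
  · exact Or.inr (Or.inr (Or.inr (Or.inr (Or.inl (char_toNat_inj (by rw [h]; decide))))))
  · exact Or.inr (Or.inr (Or.inr (Or.inr (Or.inr (Or.inl (char_toNat_inj (by rw [h]; decide)))))))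
  · exact Or.inr (Or.inr (Or.inr (Or.inr (Or.inr (Or.inr (Or.inl (char_toNat_inj (by rw [h]; decide))))))))
  · exact Or.inr (Or.inr (Or.inr (Or.inr (Or.inr (Or.inr (Or.inr (Or.inl (char_toNat_inj (by rw [h]; decide)))))))))
  · exact Or.inr (Or.inr (Or.inr (Or.inr (Or.inr (Or.inr (Or.inr (Or.inr (Or.inl (char_toNat_inj (by rw [h]; decide))))))))))
  · exact Or.inr (Or.inr (Or.inr (Or.inr (Or.inr (Or.inr (Or.inr (Or.inr (Or.inr (char_toNat_inj (by rw [h]; decide))))))))))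

-- if the Source B fast-path guard fires, neither string contains a digit character
theorem no_digit_of_guard (sl tl : List Char) (hg : hasDigit sl tl = false) :
    (∀ c ∈ sl, PySem.Chars.isdigit c = false) ∧ (∀ c ∈ tl, PySem.Chars.isdigit c = false) := by
  simp only [hasDigit, List.any_eq_false] at hg
  constructor <;> intro c hc <;> by_contra hb
  · have hd := isdigit_mem c (by revert hb; cases PySem.Chars.isdigit c <;> simp)
    have hor : (PySem.Chars.find sl [c] != -1 || PySem.Chars.find tl [c] != -1) = false := by
      cases hx : (PySem.Chars.find sl [c] != -1 || PySem.Chars.find tl [c] != -1)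
      · rfl
      · exact absurd hx (hg c hd)
    rw [Bool.or_eq_false_iff, bne_eq_false_iff_eq, bne_eq_false_iff_eq] at hor
    have h2 := PySem.Chars.find_eq_neg_one_iff sl [c] |>.mp hor.1
    exact h2 ((List.singleton_infix_iff c sl).mpr hc)
  · have hd := isdigit_mem c (by revert hb; cases PySem.Chars.isdigit c <;> simp)
    have hor : (PySem.Chars.find sl [c] != -1 || PySem.Chars.find tl [c] != -1) = false := by
      cases hx : (PySem.Chars.find sl [c] != -1 || PySem.Chars.find tl [c] != -1)
      · rfl
      · exact absurd hx (hg c hd)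
    rw [Bool.or_eq_false_iff, bne_eq_false_iff_eq, bne_eq_false_iff_eq] at hor
    have h2 := PySem.Chars.find_eq_neg_one_iff tl [c] |>.mp hor.2
    exact h2 ((List.singleton_infix_iff c tl).mpr hc)

-- A's foldl over enumerate, as a sum of 0/1 weights over the index range
theorem foldl_enumerate_count (q : Int → Bool) :
    ∀ (l : List Char) (k : Int) (acc : Int),
    (PySem.List.enumerate l k).foldl
      (fun counter p => if PySem.Chars.isdigit p.2 then
          (if q p.1 then counter + 1 else counter) else counter) acc
    = acc + ((List.range l.length).map
        (fun j => if PySem.Chars.isdigit (l.getD j ' ') && q (k + (j : Int)) then (1 : Int) else 0)).sum := by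
  intro l
  induction l with
  | nil => intro k acc; simp [PySem.List.enumerate]
  | cons x xs ih =>
    intro k acc
    rw [PySem.List.enumerate_cons, List.foldl_cons, ih (k + 1)]
    rw [List.length_cons, List.range_succ_eq_map, List.map_cons, List.sum_cons, List.map_map]
    have hmap : ∀ j ∈ List.range xs.length,
        ((fun j => if PySem.Chars.isdigit ((x :: xs).getD j ' ') && q (k + (j : Int)) then (1 : Int) else 0) ∘ Nat.succ) j
        = (fun j => if PySem.Chars.isdigit (xs.getD j ' ') && q ((k + 1) + (j : Int)) then (1 : Int) else 0) j := by
      intro j _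
      simp only [Function.comp]
      have : k + ((j.succ : Nat) : Int) = (k + 1) + (j : Int) := by push_cast; ring
      rw [this]
      rfl
    rw [List.map_congr_left hmap]
    have hbody : (if PySem.Chars.isdigit x then (if q k then acc + 1 else acc) else acc)
        = acc + (if PySem.Chars.isdigit ((x :: xs).getD 0 ' ') && q (k + ((0 : Nat) : Int)) then (1 : Int) else 0) := by
      simp only [List.getD_cons_zero, Nat.cast_zero, add_zero]
      cases hd : PySem.Chars.isdigit x <;> cases hq : q k <;> simp
    rw [hbody]
    ring

-- the two per-index weights agree
theorem wS_eq (sl tl : List Char) (j : Nat) (hj : j < sl.length) :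
    (if PySem.Chars.isdigit (sl.getD j ' ') &&
        PySem.Chars.strLt (PySem.List.slice sl none (some ((j : Int))) ++
          PySem.List.slice sl (some ((j : Int) + 1)) none) tl then (1 : Int) else 0)
    = wS sl tl (lcpLen sl tl)
        (decide (lcpLen sl tl < sl.length) && decide (lcpLen sl tl < tl.length) &&
         decide (sl.getD (lcpLen sl tl) ' ' < tl.getD (lcpLen sl tl) ' ')) j := by
  have hsl : PySem.List.slice sl none (some ((j : Int))) = sl.take j :=
    PySem.List.slice_to_natCast sl j
  have hc : (j : Int) + 1 = ((j + 1 : Nat) : Int) := by push_cast; ring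
  have hsr : PySem.List.slice sl (some ((j : Int) + 1)) none = sl.drop (j + 1) := by
    rw [hc]; exact PySem.List.slice_from_natCast sl (j + 1)
  rw [hsl, hsr]
  unfold wS PySem.Chars.strLt
  have hcond : (decide ((sl.take j ++ sl.drop (j + 1)) < tl))
      = (if j ≤ lcpLen sl tl then decide (sl.drop (j + 1) < tl.drop j)
         else decide (lcpLen sl tl < sl.length) && decide (lcpLen sl tl < tl.length) &&
              decide (sl.getD (lcpLen sl tl) ' ' < tl.getD (lcpLen sl tl) ' ')) := by
    have hd := delS_iff sl tl j hj
    by_cases hjk : j ≤ lcpLen sl tl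
    · rw [if_pos hjk] at hd
      rw [if_pos hjk]
      exact decide_eq_decide.mpr hd
    · rw [if_neg hjk] at hd
      rw [if_neg hjk]
      have h1 : lcpLen sl tl < sl.length := by
        have := lt_of_not_ge hjk; omega
      rw [decide_eq_decide.mpr hd]
      · simp [h1, Bool.decide_and]
      · infer_instance
  rw [hcond]

theorem wT_eq (sl tl : List Char) (j : Nat) (hj : j < tl.length) :
    (if PySem.Chars.isdigit (tl.getD j ' ') &&
        PySem.Chars.strLt sl (PySem.List.slice tl none (some ((j : Int))) ++
          PySem.List.slice tl (some ((j : Int) + 1)) none) then (1 : Int) else 0)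
    = wT sl tl (lcpLen sl tl)
        (decide (sl.length ≤ lcpLen sl tl) ||
         (decide (lcpLen sl tl < tl.length) &&
          decide (sl.getD (lcpLen sl tl) ' ' < tl.getD (lcpLen sl tl) ' '))) j := by
  have hsl : PySem.List.slice tl none (some ((j : Int))) = tl.take j :=
    PySem.List.slice_to_natCast tl j
  have hc : (j : Int) + 1 = ((j + 1 : Nat) : Int) := by push_cast; ring
  have hsr : PySem.List.slice tl (some ((j : Int) + 1)) none = tl.drop (j + 1) := by
    rw [hc]; exact PySem.List.slice_from_natCast tl (j + 1)
  rw [hsl, hsr]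
  unfold wT PySem.Chars.strLt
  have hcond : (decide (sl < tl.take j ++ tl.drop (j + 1)))
      = (if j ≤ lcpLen sl tl then decide (sl.drop j < tl.drop (j + 1))
         else decide (sl.length ≤ lcpLen sl tl) ||
              (decide (lcpLen sl tl < tl.length) &&
               decide (sl.getD (lcpLen sl tl) ' ' < tl.getD (lcpLen sl tl) ' '))) := by
    have hd := delT_iff sl tl j hj
    by_cases hjk : j ≤ lcpLen sl tl
    · rw [if_pos hjk] at hd
      rw [if_pos hjk]
      exact decide_eq_decide.mpr hd
    · rw [if_neg hjk] at hd
      rw [if_neg hjk]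
      rw [decide_eq_decide.mpr hd]
      · simp [Bool.decide_or, Bool.decide_and]
      · infer_instance
  rw [hcond]

-- ===== VERDICT (by name: the statement is the Claim_ definition above) =====
theorem solution_spec : Claim_equal_solution := by
  intro s t _
  unfold Spec_solution
  simp only [solution, solution_alt]
  by_cases hg : hasDigit s.toList t.toList
  case neg =>
    -- fast path: no digit occurs in either string, so A's two loops never count
    have hgf : hasDigit s.toList t.toList = false := by
      cases h : hasDigit s.toList t.toList
      · rfl
      · exact absurd h hg
    obtain ⟨hs, ht⟩ := no_digit_of_guard _ _ hgf
    rw [hgf]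
    simp only [Bool.not_false, if_true]
    rw [foldl_enumerate_count
          (fun i => PySem.Chars.strLt (PySem.List.slice s.toList none (some i) ++
            PySem.List.slice s.toList (some (i + 1)) none) t.toList) s.toList 0 0,
        foldl_enumerate_count
          (fun i => PySem.Chars.strLt s.toList (PySem.List.slice t.toList none (some i) ++
            PySem.List.slice t.toList (some (i + 1)) none)) t.toList 0]
    have hzs : ∀ j ∈ List.range s.toList.length,
        (if PySem.Chars.isdigit (s.toList.getD j ' ') &&
            (fun i => PySem.Chars.strLt (PySem.List.slice s.toList none (some i) ++
              PySem.List.slice s.toList (some (i + 1)) none) t.toList) (0 + (j : Int))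
         then (1 : Int) else 0) = (fun _ : Nat => (0 : Int)) j := by
      intro j hj
      have hjl : j < s.toList.length := List.mem_range.mp hj
      rw [List.getD_eq_getElem _ ' ' hjl, hs _ (List.getElem_mem hjl)]
      simp
    have hzt : ∀ j ∈ List.range t.toList.length,
        (if PySem.Chars.isdigit (t.toList.getD j ' ') &&
            (fun i => PySem.Chars.strLt s.toList (PySem.List.slice t.toList none (some i) ++
              PySem.List.slice t.toList (some (i + 1)) none)) (0 + (j : Int))
         then (1 : Int) else 0) = (fun _ : Nat => (0 : Int)) j := by
      intro j hj
      have hjl : j < t.toList.length := List.mem_range.mp hj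
      rw [List.getD_eq_getElem _ ' ' hjl, ht _ (List.getElem_mem hjl)]
      simp
    rw [List.map_congr_left hzs, List.map_congr_left hzt]
    simp
  case pos =>
    rw [hg]
    simp only [Bool.not_true, Bool.false_eq_true, if_false]
    rw [loopS_spec _ _ _ _ _ 0 false le_rfl (Or.inl rfl),
        loopT_spec _ _ _ _ _ _ false le_rfl (Or.inl rfl)]
    rw [foldl_enumerate_count
          (fun i => PySem.Chars.strLt (PySem.List.slice s.toList none (some i) ++
            PySem.List.slice s.toList (some (i + 1)) none) t.toList) s.toList 0 0,
        foldl_enumerate_count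
          (fun i => PySem.Chars.strLt s.toList (PySem.List.slice t.toList none (some i) ++
            PySem.List.slice t.toList (some (i + 1)) none)) t.toList 0]
    congr 1
    · congr 1
      exact congrArg List.sum (List.map_congr_left (fun j hj => by
        simp only [zero_add]
        exact wS_eq s.toList t.toList j (List.mem_range.mp hj)))
    · exact congrArg List.sum (List.map_congr_left (fun j hj => by
        simp only [zero_add]
        exact wT_eq s.toList t.toList j (List.mem_range.mp hj)))
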